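-- pv_equiv track=rewrite | github.com/Aibrec/advent-2025 | Day 12a/main.py | flip_horizontally
-- ===== SOURCE A (Python) =====
-- def flip_horizontally(shape):
--     flipped = set()
--
--     # Wow is there ever a better way to do this
--     mappings = {
--         (0,0): (0,2),
--         (0,1): (0,1),
--         (0,2): (0,0),
--
--         (1,0): (1, 2),
--         (1,1): (1, 1),
--         (1,2): (1, 0),
--
--         (2,0): (2,2),
--         (2,1): (2,1),
--         (2,2): (2,0),
--     }
--
--     for start,end in mappings.items():
--         if start in shape:
--             flipped.add(end)
--
--     return flipped
-- ===== SOURCE B (Python) =====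
-- def flip_horizontally(shape):
--     # Single pass over the input: record the in-range cells in a 9-bit mask,
--     # then decode the mask back to the mirrored cells.
--     mask = 0
--     for r, c in shape:
--         if 0 <= r < 3 and 0 <= c < 3:
--             mask |= 1 << (3 * r + c)
--     flipped = set()
--     for i in range(9):
--         if mask >> i & 1:
--             flipped.add((i // 3, 2 - i % 3))
--     return flipped
-- ===== Notes on version B (the rewrite author's own statement) =====
-- stated objective: alternative
-- what changed: Replaces the 9-entry mapping table with nine 'in shape' scans by one pass over the input that accumulates the in-range cells into a 9-bit mask, then a decode loop that emits each mirrored cell (i//3, 2 - i%3) from the mask.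
import Mathlib
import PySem

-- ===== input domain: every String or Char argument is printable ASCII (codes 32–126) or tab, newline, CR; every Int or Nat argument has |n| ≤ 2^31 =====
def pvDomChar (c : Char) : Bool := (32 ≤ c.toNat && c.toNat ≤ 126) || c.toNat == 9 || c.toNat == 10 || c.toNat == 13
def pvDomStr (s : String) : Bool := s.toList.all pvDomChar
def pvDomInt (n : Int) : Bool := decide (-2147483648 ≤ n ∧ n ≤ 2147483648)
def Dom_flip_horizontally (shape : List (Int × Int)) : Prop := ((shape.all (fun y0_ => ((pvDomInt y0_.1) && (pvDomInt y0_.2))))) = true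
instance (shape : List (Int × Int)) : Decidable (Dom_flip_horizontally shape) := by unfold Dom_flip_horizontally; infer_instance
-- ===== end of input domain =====

-- B replaces A's 9-entry lookup table (nine `in shape` scans) by one pass over the
-- input accumulating a 9-bit mask, then a decode loop over the mask (objective: alternative single-pass accumulation).


-- ===== PORT A =====
-- literal port of A: 9-entry mapping dict, then a loop over its items adding ends to a set
def flip_horizontally (shape : List (Int × Int)) : List (Int × Int) :=
  let mappings : PySem.Dict (Int × Int) (Int × Int) :=
    (((((((((PySem.Dict.empty
      ).insert (0,0) (0,2)
      ).insert (0,1) (0,1)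
      ).insert (0,2) (0,0)
      ).insert (1,0) (1,2)
      ).insert (1,1) (1,1)
      ).insert (1,2) (1,0)
      ).insert (2,0) (2,2)
      ).insert (2,1) (2,1)
      ).insert (2,2) (2,0)
  (PySem.Dict.items mappings).foldl
    (fun flipped se => if shape.contains se.1 then PySem.Set.add flipped se.2 else flipped)
    PySem.Set.empty

-- ===== PORT B =====
-- B: one pass over shape builds a 9-bit mask of the in-range cells; a second loop
-- decodes bit i of the mask to the mirrored cell (i // 3, 2 - i % 3)
def flip_horizontally_alt (shape : List (Int × Int)) : List (Int × Int) :=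
  let mask : Nat := shape.foldl
    (fun (m : Nat) (rc : Int × Int) =>
      if 0 ≤ rc.1 ∧ rc.1 < 3 ∧ 0 ≤ rc.2 ∧ rc.2 < 3
      then m ||| (1 <<< (3 * rc.1 + rc.2).toNat) else m) 0
  (PySem.List.pyRange 0 9 1).foldl
    (fun flipped i =>
      if (mask >>> i.toNat) &&& 1 == 1
      then PySem.Set.add flipped (PySem.Int.floordiv i 3, 2 - PySem.Int.mod i 3)
      else flipped)
    PySem.Set.empty

-- ===== PRECONDITION & SPEC =====
def Spec_flip_horizontally (shape : List (Int × Int)) (out : List (Int × Int)) : Prop := out = flip_horizontally_alt shape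
instance (shape : List (Int × Int)) (out : List (Int × Int)) : Decidable (Spec_flip_horizontally shape out) := by unfold Spec_flip_horizontally; infer_instance

-- ===== CLAIM (what is proved, stated in full; the proofs are below) =====
def Claim_equal_flip_horizontally : Prop := ∀ (shape : List (Int × Int)), Dom_flip_horizontally shape → Spec_flip_horizontally shape (flip_horizontally shape)

-- ===== LEMMAS AND PROOFS =====

-- bit 3r+c of B's mask records membership of the in-range cell (r,c) in shape
theorem mask_testBit (shape : List (Int × Int)) (m : Nat) (r c : Int)
    (hr : 0 ≤ r ∧ r < 3) (hc : 0 ≤ c ∧ c < 3) :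
    Nat.testBit
      (shape.foldl (fun (m : Nat) (rc : Int × Int) =>
        if 0 ≤ rc.1 ∧ rc.1 < 3 ∧ 0 ≤ rc.2 ∧ rc.2 < 3
        then m ||| (1 <<< (3 * rc.1 + rc.2).toNat) else m) m)
      (3 * r + c).toNat
    = (Nat.testBit m (3 * r + c).toNat || shape.contains (r, c)) := by
  induction shape generalizing m with
  | nil => simp
  | cons a t ih =>
    simp only [List.foldl_cons, List.contains_cons]
    rw [ih]
    split_ifs with h
    · rw [Nat.testBit_or, Nat.testBit_shiftLeft]
      by_cases he : a = (r, c)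
      · subst he
        simp only [BEq.rfl, Bool.true_or, le_refl, decide_true, Nat.sub_self]
        cases hm : Nat.testBit m (3 * r + c).toNat <;> simp
      · have hne : (3 * a.1 + a.2).toNat ≠ (3 * r + c).toNat := by
          intro hh
          apply he
          have h1 : a.1 = r := by omega
          have h2 : a.2 = c := by omega
          cases a; simp_all
        have hb : (decide ((3*a.1+a.2).toNat ≤ (3*r+c).toNat) && Nat.testBit 1 ((3*r+c).toNat - (3*a.1+a.2).toNat)) = false := by
          by_cases hle : (3*a.1+a.2).toNat ≤ (3*r+c).toNat
          · have hz : Nat.testBit 1 ((3*r+c).toNat - (3*a.1+a.2).toNat) = false :=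
              Nat.testBit_eq_false_of_lt (Nat.one_lt_two_pow_iff.mpr (by omega))
            rw [hz, Bool.and_false]
          · simp [hle]
        rw [hb]
        have hbe : ((r, c) == a) = false :=
          beq_eq_false_iff_ne.mpr (fun hh => he hh.symm)
        rw [hbe]; cases Nat.testBit m (3 * r + c).toNat <;> simp
    · have hbe : ((r, c) == a) = false :=
        beq_eq_false_iff_ne.mpr (fun hh => (by rw [← hh] at h; exact h ⟨hr.1, hr.2, hc.1, hc.2⟩))
      rw [hbe]; cases Nat.testBit m (3 * r + c).toNat <;> simp

-- Boolean bit test of B's decode loop, expressed via Nat.testBit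
theorem bit_lemma (m k : Nat) : ((m >>> k) &&& 1 == 1) = Nat.testBit m k := by
  simp [Nat.testBit, Nat.shiftRight_eq_div_pow, Nat.and_one_is_mod, Nat.one_and_eq_mod_two]

-- the two 9-step folds with their Boolean conditions abstracted
theorem fold_eq (p : Int × Int → Bool) (q : Int → Bool)
    (b0 b1 b2 b3 b4 b5 b6 b7 b8 : Bool)
    (hp0 : p (0, 0) = b0) (hp1 : p (0, 1) = b1) (hp2 : p (0, 2) = b2) (hp3 : p (1, 0) = b3) (hp4 : p (1, 1) = b4) (hp5 : p (1, 2) = b5) (hp6 : p (2, 0) = b6) (hp7 : p (2, 1) = b7) (hp8 : p (2, 2) = b8)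
    (hq0 : q 0 = b0) (hq1 : q 1 = b1) (hq2 : q 2 = b2) (hq3 : q 3 = b3) (hq4 : q 4 = b4) (hq5 : q 5 = b5) (hq6 : q 6 = b6) (hq7 : q 7 = b7) (hq8 : q 8 = b8) :
    List.foldl (fun flipped se => if p se.1 then PySem.Set.add flipped se.2 else flipped)
      PySem.Set.empty [(((0:Int),(0:Int)),((0:Int),(2:Int))), (((0:Int),(1:Int)),((0:Int),(1:Int))), (((0:Int),(2:Int)),((0:Int),(0:Int))), (((1:Int),(0:Int)),((1:Int),(2:Int))), (((1:Int),(1:Int)),((1:Int),(1:Int))), (((1:Int),(2:Int)),((1:Int),(0:Int))), (((2:Int),(0:Int)),((2:Int),(2:Int))), (((2:Int),(1:Int)),((2:Int),(1:Int))), (((2:Int),(2:Int)),((2:Int),(0:Int)))]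
    = List.foldl (fun flipped i => if q i then PySem.Set.add flipped (PySem.Int.floordiv i 3, 2 - PySem.Int.mod i 3) else flipped)
      PySem.Set.empty [0, 1, 2, 3, 4, 5, 6, 7, 8] := by
  simp only [List.foldl_cons, List.foldl_nil, hp0, hp1, hp2, hp3, hp4, hp5, hp6, hp7, hp8,
    hq0, hq1, hq2, hq3, hq4, hq5, hq6, hq7, hq8]
  cases b0 <;> cases b1 <;> cases b2 <;> cases b3 <;> cases b4 <;>
  cases b5 <;> cases b6 <;> cases b7 <;> cases b8 <;> rfl

-- ===== VERDICT (by name: the statement is the Claim_ definition above) =====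
theorem flip_horizontally_spec : Claim_equal_flip_horizontally := by
  intro shape _
  unfold Spec_flip_horizontally flip_horizontally flip_horizontally_alt
  have hrange : PySem.List.pyRange 0 9 1 = [0,1,2,3,4,5,6,7,8] := by decide
  have hitems : PySem.Dict.items ((((((((((PySem.Dict.empty
      ).insert ((0:Int),(0:Int)) ((0:Int),(2:Int))
      ).insert (0,1) (0,1)
      ).insert (0,2) (0,0)
      ).insert (1,0) (1,2)
      ).insert (1,1) (1,1)
      ).insert (1,2) (1,0)
      ).insert (2,0) (2,2)
      ).insert (2,1) (2,1)
      ).insert (2,2) (2,0))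
      = [(((0:Int),(0:Int)),((0:Int),(2:Int))), (((0:Int),(1:Int)),((0:Int),(1:Int))), (((0:Int),(2:Int)),((0:Int),(0:Int))), (((1:Int),(0:Int)),((1:Int),(2:Int))), (((1:Int),(1:Int)),((1:Int),(1:Int))), (((1:Int),(2:Int)),((1:Int),(0:Int))), (((2:Int),(0:Int)),((2:Int),(2:Int))), (((2:Int),(1:Int)),((2:Int),(1:Int))), (((2:Int),(2:Int)),((2:Int),(0:Int)))] := by decide
  dsimp only
  rw [hrange, hitems]
  refine fold_eq _ _ (shape.contains ((0:Int), (0:Int))) (shape.contains ((0:Int), (1:Int))) (shape.contains ((0:Int), (2:Int))) (shape.contains ((1:Int), (0:Int))) (shape.contains ((1:Int), (1:Int))) (shape.contains ((1:Int), (2:Int))) (shape.contains ((2:Int), (0:Int))) (shape.contains ((2:Int), (1:Int))) (shape.contains ((2:Int), (2:Int)))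
    rfl rfl rfl rfl rfl rfl rfl rfl rfl ?_ ?_ ?_ ?_ ?_ ?_ ?_ ?_ ?_
  · rw [show (((0:Int)).toNat) = 0 from by decide, bit_lemma]
    have h := mask_testBit shape 0 0 0 (by norm_num) (by norm_num)
    rw [show ((3*(0:Int)+0).toNat) = 0 from by decide, Nat.zero_testBit, Bool.false_or] at h
    exact h
  · rw [show (((1:Int)).toNat) = 1 from by decide, bit_lemma]
    have h := mask_testBit shape 0 0 1 (by norm_num) (by norm_num)
    rw [show ((3*(0:Int)+1).toNat) = 1 from by decide, Nat.zero_testBit, Bool.false_or] at h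
    exact h
  · rw [show (((2:Int)).toNat) = 2 from by decide, bit_lemma]
    have h := mask_testBit shape 0 0 2 (by norm_num) (by norm_num)
    rw [show ((3*(0:Int)+2).toNat) = 2 from by decide, Nat.zero_testBit, Bool.false_or] at h
    exact h
  · rw [show (((3:Int)).toNat) = 3 from by decide, bit_lemma]
    have h := mask_testBit shape 0 1 0 (by norm_num) (by norm_num)
    rw [show ((3*(1:Int)+0).toNat) = 3 from by decide, Nat.zero_testBit, Bool.false_or] at h
    exact h
  · rw [show (((4:Int)).toNat) = 4 from by decide, bit_lemma]
    have h := mask_testBit shape 0 1 1 (by norm_num) (by norm_num)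
    rw [show ((3*(1:Int)+1).toNat) = 4 from by decide, Nat.zero_testBit, Bool.false_or] at h
    exact h
  · rw [show (((5:Int)).toNat) = 5 from by decide, bit_lemma]
    have h := mask_testBit shape 0 1 2 (by norm_num) (by norm_num)
    rw [show ((3*(1:Int)+2).toNat) = 5 from by decide, Nat.zero_testBit, Bool.false_or] at h
    exact h
  · rw [show (((6:Int)).toNat) = 6 from by decide, bit_lemma]
    have h := mask_testBit shape 0 2 0 (by norm_num) (by norm_num)
    rw [show ((3*(2:Int)+0).toNat) = 6 from by decide, Nat.zero_testBit, Bool.false_or] at h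
    exact h
  · rw [show (((7:Int)).toNat) = 7 from by decide, bit_lemma]
    have h := mask_testBit shape 0 2 1 (by norm_num) (by norm_num)
    rw [show ((3*(2:Int)+1).toNat) = 7 from by decide, Nat.zero_testBit, Bool.false_or] at h
    exact h
  · rw [show (((8:Int)).toNat) = 8 from by decide, bit_lemma]
    have h := mask_testBit shape 0 2 2 (by norm_num) (by norm_num)
    rw [show ((3*(2:Int)+2).toNat) = 8 from by decide, Nat.zero_testBit, Bool.false_or] at h
    exact h
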